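-- pv_equiv track=rewrite | github.com/Arsen1302/Code-copy-detector | TestData/solutions/problem_604_5.py | solution_604_5
-- ===== SOURCE A (Python) =====
-- from typing import List
--
-- def solution_604_5(nums: List[int]) -> List[int]:
--     n = len(nums)
--     for i in range(n-1):
--         swapped= False
--         for j in range(n-i-1):
--             if nums[j]%2==0 and j%2!=0  :
--                 for k in range(j+1,n):
--                     if k%2==0 and nums[k]%2!=0:
--                         x = nums[j]
--                         nums[j]= nums[k]
--                         nums[k]= x
--                         swapped= True
--                         break;
--             elif nums[j]%2!=0 and j%2==0  :
--                 for k in range(j+1,n):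
--                     if k%2!=0 and nums[k]%2==0:
--                         x = nums[j]
--                         nums[j]= nums[k]
--                         nums[k]= x
--                         swapped= True
--                         break;
--         if not swapped :
--             return nums
--     return nums
-- ===== SOURCE B (Python) =====
-- from typing import List
--
-- def solution_604_5(nums: List[int]) -> List[int]:
--     # One pass to collect misplaced indices, then pair them up positionally.
--     # (Note: the original mutates its argument in place; this version does not.)
--     out = list(nums)
--     mis_even = [i for i in range(len(out)) if i % 2 == 1 and out[i] % 2 == 0]
--     mis_odd = [i for i in range(len(out)) if i % 2 == 0 and out[i] % 2 == 1]
--     for a, b in zip(mis_even, mis_odd):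
--         out[a], out[b] = out[b], out[a]
--     return out
-- ===== Notes on version B (the rewrite author's own statement) =====
-- stated objective: faster
-- what changed: Replaces the bubble-style outer loop with per-element forward rescans for a swap partner by one pass that collects the two lists of misplaced indices and swaps them pairwise (i-th even-value-at-odd-index with i-th odd-value-at-even-index).
import Mathlib
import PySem

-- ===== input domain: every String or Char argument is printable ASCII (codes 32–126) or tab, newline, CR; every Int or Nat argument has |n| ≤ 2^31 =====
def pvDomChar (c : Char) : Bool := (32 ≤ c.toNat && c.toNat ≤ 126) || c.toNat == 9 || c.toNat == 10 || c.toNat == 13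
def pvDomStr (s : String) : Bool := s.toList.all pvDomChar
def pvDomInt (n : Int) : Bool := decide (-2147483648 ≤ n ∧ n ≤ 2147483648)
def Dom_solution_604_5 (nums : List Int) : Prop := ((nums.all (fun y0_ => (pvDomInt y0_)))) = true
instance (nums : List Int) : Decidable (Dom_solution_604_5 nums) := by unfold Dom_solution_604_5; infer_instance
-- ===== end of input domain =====

-- B replaces A's bubble-style passes with per-element forward rescans by one pass collecting the
-- two lists of misplaced indices, which are then swapped pairwise (objective: faster).
-- Python A mutates its argument in place; the equivalence proved here is about the return value.

-- ===== PORT A =====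
-- x = nums[j]; nums[j] = nums[k]; nums[k] = x
def pvSwap (xs : List Int) (j k : Nat) : List Int :=
  (xs.set j (xs.getD k 0)).set k (xs.getD j 0)

-- body of A's j-loop: the two branch conditions and the inner k-loop (first match, break)
def pvJStep (n : Nat) (st : List Int × Bool) (j : Nat) : List Int × Bool :=
  let xs := st.1
  if xs.getD j 0 % 2 == 0 && j % 2 != 0 then
    match (List.range' (j+1) (n - (j+1))).find? (fun k => k % 2 == 0 && xs.getD k 0 % 2 != 0) with
    | some k => (pvSwap xs j k, true)
    | none => st
  else if xs.getD j 0 % 2 != 0 && j % 2 == 0 then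
    match (List.range' (j+1) (n - (j+1))).find? (fun k => k % 2 != 0 && xs.getD k 0 % 2 == 0) with
    | some k => (pvSwap xs j k, true)
    | none => st
  else st

-- A's outer i-loop with the early return when a pass made no swap
def pvOuter (n : Nat) : List Nat → List Int → List Int
  | [], xs => xs
  | i :: is, xs =>
    let r := (List.range (n - i - 1)).foldl (pvJStep n) (xs, false)
    if r.2 then pvOuter n is r.1 else r.1

def solution_604_5 (nums : List Int) : List Int :=
  pvOuter nums.length (List.range (nums.length - 1)) nums

-- ===== PORT B =====
def pvMisEvens (nums : List Int) : List Nat :=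
  (List.range nums.length).filter (fun i => i % 2 == 1 && nums.getD i 0 % 2 == 0)

def pvMisOdds (nums : List Int) : List Nat :=
  (List.range nums.length).filter (fun i => i % 2 == 0 && nums.getD i 0 % 2 == 1)

-- out[a], out[b] = out[b], out[a]
def pvSwapPair (xs : List Int) (q : Nat × Nat) : List Int :=
  (xs.set q.1 (xs.getD q.2 0)).set q.2 (xs.getD q.1 0)

def solution_604_5_alt (nums : List Int) : List Int :=
  ((pvMisEvens nums).zip (pvMisOdds nums)).foldl pvSwapPair nums

-- ===== PRECONDITION & SPEC =====
def Spec_solution_604_5 (nums : List Int) (out : List Int) : Prop := out = solution_604_5_alt nums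
instance (nums : List Int) (out : List Int) : Decidable (Spec_solution_604_5 nums out) := by unfold Spec_solution_604_5; infer_instance

-- ===== CLAIM (what is proved, stated in full; the proofs are below) =====
def Claim_equal_solution_604_5 : Prop := ∀ (nums : List Int), Dom_solution_604_5 nums → Spec_solution_604_5 nums (solution_604_5 nums)

-- ===== LEMMAS AND PROOFS =====

-- the list of misplaced-index pairs, and the state after the first t pairwise swaps
def pvPairs (nums : List Int) : List (Nat × Nat) := (pvMisEvens nums).zip (pvMisOdds nums)

def pvZp (nums : List Int) (t : Nat) : List Int := ((pvPairs nums).take t).foldl pvSwapPair nums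

-- basic getD/set facts
lemma getD_set_ne (xs : List Int) (i : Nat) (v : Int) (q : Nat) (h : q ≠ i) :
    (xs.set i v).getD q 0 = xs.getD q 0 := by
  simp [List.getD, List.getElem?_set_ne (Ne.symm h)]

lemma getD_set_self (xs : List Int) (i : Nat) (v : Int) (h : i < xs.length) :
    (xs.set i v).getD i 0 = v := by
  simp [List.getD, h]

lemma getD_swapPair (xs : List Int) (a b q : Nat) (ha : a < xs.length) (hb : b < xs.length)
    (hab : a ≠ b) :
    (pvSwapPair xs (a, b)).getD q 0 =
      if q = b then xs.getD a 0 else if q = a then xs.getD b 0 else xs.getD q 0 := by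
  by_cases hqb : q = b
  · subst hqb
    rw [pvSwapPair, if_pos rfl]
    exact getD_set_self _ _ _ (by simpa using hb)
  · by_cases hqa : q = a
    · subst hqa
      rw [pvSwapPair, if_neg hqb, if_pos rfl, getD_set_ne _ _ _ _ hqb]
      exact getD_set_self _ _ _ ha
    · rw [pvSwapPair, if_neg hqb, if_neg hqa, getD_set_ne _ _ _ _ hqb,
        getD_set_ne _ _ _ _ hqa]

lemma length_foldl_swapPair (l : List (Nat × Nat)) : ∀ xs : List Int,
    (l.foldl pvSwapPair xs).length = xs.length := by
  induction l with
  | nil => intro xs; rfl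
  | cons q l ih => intro xs; rw [List.foldl_cons, ih]; simp [pvSwapPair]

lemma length_zp (nums : List Int) (t : Nat) : (pvZp nums t).length = nums.length :=
  length_foldl_swapPair _ _

-- the four Bool conditions of the ports, as propositions
lemma condE_bool (xs : List Int) (j : Nat) :
    ((xs.getD j 0 % 2 == 0 && j % 2 != 0) = true) ↔ (j % 2 = 1 ∧ xs.getD j 0 % 2 = 0) := by
  simp only [Bool.and_eq_true, beq_iff_eq, bne_iff_ne, ne_eq]
  constructor
  · rintro ⟨h1, h2⟩; exact ⟨by omega, h1⟩
  · rintro ⟨h1, h2⟩; exact ⟨h2, by omega⟩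

lemma condO_bool (xs : List Int) (j : Nat) :
    ((xs.getD j 0 % 2 != 0 && j % 2 == 0) = true) ↔ (j % 2 = 0 ∧ xs.getD j 0 % 2 = 1) := by
  simp only [Bool.and_eq_true, bne_iff_ne, ne_eq, beq_iff_eq]
  constructor
  · rintro ⟨h1, h2⟩
    rcases Int.emod_two_eq (xs.getD j 0) with h | h
    · exact absurd h h1
    · exact ⟨h2, h⟩
  · rintro ⟨h1, h2⟩; exact ⟨by omega, h1⟩

lemma predO_bool (xs : List Int) (k : Nat) :
    ((k % 2 == 0 && xs.getD k 0 % 2 != 0) = true) ↔ (k % 2 = 0 ∧ xs.getD k 0 % 2 = 1) := by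
  simp only [Bool.and_eq_true, bne_iff_ne, ne_eq, beq_iff_eq]
  constructor
  · rintro ⟨h1, h2⟩
    rcases Int.emod_two_eq (xs.getD k 0) with h | h
    · exact absurd h h2
    · exact ⟨h1, h⟩
  · rintro ⟨h1, h2⟩; exact ⟨h1, by omega⟩

lemma predE_bool (xs : List Int) (k : Nat) :
    ((k % 2 != 0 && xs.getD k 0 % 2 == 0) = true) ↔ (k % 2 = 1 ∧ xs.getD k 0 % 2 = 0) := by
  simp only [Bool.and_eq_true, beq_iff_eq, bne_iff_ne, ne_eq]
  constructor
  · rintro ⟨h1, h2⟩; exact ⟨by omega, h2⟩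
  · rintro ⟨h1, h2⟩; exact ⟨by omega, h2⟩

-- membership and sortedness of the misplaced-index lists
lemma mem_misEvens (nums : List Int) (q : Nat) :
    q ∈ pvMisEvens nums ↔ q < nums.length ∧ q % 2 = 1 ∧ nums.getD q 0 % 2 = 0 := by
  simp [pvMisEvens, List.mem_filter, List.mem_range]

lemma mem_misOdds (nums : List Int) (q : Nat) :
    q ∈ pvMisOdds nums ↔ q < nums.length ∧ q % 2 = 0 ∧ nums.getD q 0 % 2 = 1 := by
  simp [pvMisOdds, List.mem_filter, List.mem_range]

lemma sorted_misEvens (nums : List Int) : (pvMisEvens nums).Pairwise (· < ·) :=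
  List.pairwise_lt_range.sublist List.filter_sublist

lemma sorted_misOdds (nums : List Int) : (pvMisOdds nums).Pairwise (· < ·) :=
  List.pairwise_lt_range.sublist List.filter_sublist

lemma mem_drop_sorted_ge (l : List Nat) (hs : l.Pairwise (· < ·)) (t : Nat)
    (htl : t < l.length) (q : Nat) (hq : q ∈ l.drop t) : l[t] ≤ q := by
  have hdrop : (l.drop t).Pairwise (· < ·) := hs.sublist (List.drop_sublist ..)
  rw [List.drop_eq_getElem_cons htl] at hq hdrop
  rw [List.mem_cons] at hq
  rcases hq with rfl | hq
  · exact le_refl _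
  · exact le_of_lt ((List.pairwise_cons.mp hdrop).1 q hq)

lemma head_not_mem_drop_succ (l : List Nat) (hs : l.Pairwise (· < ·)) (t : Nat)
    (htl : t < l.length) : l[t] ∉ l.drop (t + 1) := by
  have hdrop : (l.drop t).Pairwise (· < ·) := hs.sublist (List.drop_sublist ..)
  rw [List.drop_eq_getElem_cons htl] at hdrop
  intro hmem
  exact absurd ((List.pairwise_cons.mp hdrop).1 _ hmem) (lt_irrefl _)

lemma getElem_strict (l : List Nat) (hs : l.Pairwise (· < ·)) (i j : Nat)
    (hi : i < l.length) (hj : j < l.length) (hij : i < j) : l[i] < l[j] :=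
  List.pairwise_iff_getElem.mp hs i j hi hj hij

lemma pairs_length (nums : List Int) :
    (pvPairs nums).length = min (pvMisEvens nums).length (pvMisOdds nums).length := by
  simp [pvPairs]

lemma pairs_getElem (nums : List Int) (t : Nat) (ht : t < (pvPairs nums).length) :
    (pvPairs nums).getD t (0, 0) =
      ((pvMisEvens nums)[t]'(by rw [pairs_length] at ht; omega),
       (pvMisOdds nums)[t]'(by rw [pairs_length] at ht; omega)) := by
  rw [List.getD_eq_getElem _ _ ht]
  simp [pvPairs]

lemma zp_succ (nums : List Int) (t : Nat) (ht : t < (pvPairs nums).length) :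
    pvZp nums (t + 1) = pvSwapPair (pvZp nums t) ((pvPairs nums).getD t (0, 0)) := by
  rw [pvZp, pvZp, List.take_add_one, List.getElem?_eq_getElem ht, List.foldl_append,
    List.getD_eq_getElem _ _ ht]
  rfl

lemma drop_mem_of_mem (l : List Nat) (t : Nat) (q : Nat) (hq : q ∈ l.drop t) : q ∈ l :=
  (List.drop_sublist ..).subset hq

-- main characterization: after t pairwise swaps the misplaced indices in range are exactly
-- the elements of the dropped suffixes of the two misplaced-index lists
lemma zp_char (nums : List Int) : ∀ (t : Nat), t ≤ (pvPairs nums).length →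
    ∀ q, q < nums.length →
      ((q % 2 = 1 ∧ (pvZp nums t).getD q 0 % 2 = 0) ↔ q ∈ (pvMisEvens nums).drop t) ∧
      ((q % 2 = 0 ∧ (pvZp nums t).getD q 0 % 2 = 1) ↔ q ∈ (pvMisOdds nums).drop t) := by
  intro t
  induction t with
  | zero =>
    intro _ q hq
    have hz : pvZp nums 0 = nums := rfl
    rw [hz, List.drop_zero, List.drop_zero]
    constructor
    · rw [mem_misEvens]; constructor
      · rintro ⟨h1, h2⟩; exact ⟨hq, h1, h2⟩
      · rintro ⟨_, h1, h2⟩; exact ⟨h1, h2⟩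
    · rw [mem_misOdds]; constructor
      · rintro ⟨h1, h2⟩; exact ⟨hq, h1, h2⟩
      · rintro ⟨_, h1, h2⟩; exact ⟨h1, h2⟩
  | succ t ih =>
    intro hts q hq
    have ht : t < (pvPairs nums).length := hts
    have ihh := ih (le_of_lt ht)
    have htme : t < (pvMisEvens nums).length := by rw [pairs_length] at ht; omega
    have htmo : t < (pvMisOdds nums).length := by rw [pairs_length] at ht; omega
    have hconsE : (pvMisEvens nums).drop t =
        (pvMisEvens nums)[t] :: (pvMisEvens nums).drop (t + 1) :=
      List.drop_eq_getElem_cons htme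
    have hconsO : (pvMisOdds nums).drop t =
        (pvMisOdds nums)[t] :: (pvMisOdds nums).drop (t + 1) :=
      List.drop_eq_getElem_cons htmo
    have haMemD : (pvMisEvens nums)[t] ∈ (pvMisEvens nums).drop t := by
      rw [hconsE]; exact List.mem_cons_self
    have hbMemD : (pvMisOdds nums)[t] ∈ (pvMisOdds nums).drop t := by
      rw [hconsO]; exact List.mem_cons_self
    have haMem := drop_mem_of_mem _ _ _ haMemD
    have hbMem := drop_mem_of_mem _ _ _ hbMemD
    rw [mem_misEvens] at haMem
    rw [mem_misOdds] at hbMem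
    obtain ⟨han, hap, -⟩ := haMem
    obtain ⟨hbn, hbp, -⟩ := hbMem
    have hav : (pvZp nums t).getD (pvMisEvens nums)[t] 0 % 2 = 0 :=
      ((ihh _ han).1.mpr haMemD).2
    have hbv : (pvZp nums t).getD (pvMisOdds nums)[t] 0 % 2 = 1 :=
      ((ihh _ hbn).2.mpr hbMemD).2
    have hab : (pvMisEvens nums)[t] ≠ (pvMisOdds nums)[t] := by
      intro h; rw [h] at hap; omega
    have hz : pvZp nums (t + 1) = pvSwapPair (pvZp nums t)
        ((pvMisEvens nums)[t], (pvMisOdds nums)[t]) := by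
      rw [zp_succ nums t ht, pairs_getElem nums t ht]
    have hgd := getD_swapPair (pvZp nums t) (pvMisEvens nums)[t] (pvMisOdds nums)[t] q
      (by rw [length_zp]; exact han) (by rw [length_zp]; exact hbn) hab
    rw [hz, hgd]
    by_cases hqb : q = (pvMisOdds nums)[t]
    · subst hqb
      rw [if_pos rfl]
      constructor
      · constructor
        · rintro ⟨h1, _⟩; omega
        · intro hmem
          have := drop_mem_of_mem _ _ _ hmem
          rw [mem_misEvens] at this
          omega
      · constructor
        · rintro ⟨_, h2⟩; omega
        · intro hmem
          exact absurd hmem (head_not_mem_drop_succ _ (sorted_misOdds nums) t htmo)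
    · by_cases hqa : q = (pvMisEvens nums)[t]
      · subst hqa
        rw [if_neg hqb, if_pos rfl]
        constructor
        · constructor
          · rintro ⟨_, h2⟩; omega
          · intro hmem
            exact absurd hmem (head_not_mem_drop_succ _ (sorted_misEvens nums) t htme)
        · constructor
          · rintro ⟨h1, _⟩; omega
          · intro hmem
            have := drop_mem_of_mem _ _ _ hmem
            rw [mem_misOdds] at this
            omega
      · rw [if_neg hqb, if_neg hqa]
        have ihq := ihh q hq
        constructor
        · rw [ihq.1, hconsE, List.mem_cons]
          constructor
          · intro h; rcases h with h | h
            · exact absurd h hqa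
            · exact h
          · intro h; exact Or.inr h
        · rw [ihq.2, hconsO, List.mem_cons]
          constructor
          · intro h; rcases h with h | h
            · exact absurd h hqb
            · exact h
          · intro h; exact Or.inr h

lemma find?_range'_some (p : Nat → Bool) (d : Nat) : ∀ (a k : Nat), a ≤ k → k < a + d →
    p k = true → (∀ m, a ≤ m → m < k → p m = false) →
    (List.range' a d).find? p = some k := by
  induction d with
  | zero => intro a k h1 h2; omega
  | succ d ih =>
    intro a k h1 h2 hk hmin
    rw [List.range'_succ, List.find?_cons]
    by_cases hak : a = k
    · subst hak; simp [hk]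
    · have hlt : a < k := by omega
      rw [hmin a le_rfl hlt]
      exact ih (a + 1) k (by omega) (by omega) hk (fun m hm hmk => hmin m (by omega) hmk)

-- a j-step that does not find a misplaced pair changes nothing
lemma jstep_eq_of_not_mis (nums : List Int) (t : Nat) (ht : t ≤ (pvPairs nums).length)
    (j : Nat) (hj : j < nums.length)
    (hE : j ∉ (pvMisEvens nums).drop t) (hO : j ∉ (pvMisOdds nums).drop t) (s : Bool) :
    pvJStep nums.length (pvZp nums t, s) j = (pvZp nums t, s) := by
  have hchar := zp_char nums t ht j hj
  have h1 : ((pvZp nums t).getD j 0 % 2 == 0 && j % 2 != 0) = false := by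
    rw [Bool.eq_false_iff, ne_eq, condE_bool, hchar.1]
    exact hE
  have h2 : ((pvZp nums t).getD j 0 % 2 != 0 && j % 2 == 0) = false := by
    rw [Bool.eq_false_iff, ne_eq, condO_bool, hchar.2]
    exact hO
  simp only [pvJStep, h1, h2]
  rfl

-- after all pairs are swapped, every j-step is a no-op
lemma jstep_noop (nums : List Int) (s : Bool) (j : Nat) :
    pvJStep nums.length (pvZp nums (pvPairs nums).length, s) j
      = (pvZp nums (pvPairs nums).length, s) := by
  set L := (pvPairs nums).length with hLdef
  by_cases hj : j < nums.length
  · have hchar := zp_char nums L le_rfl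
    rcases le_total (pvMisEvens nums).length (pvMisOdds nums).length with h | h
    · -- no misplaced evens remain
      have hEnil : (pvMisEvens nums).drop L = [] := by
        rw [List.drop_eq_nil_iff, hLdef, pairs_length]; omega
      have h1 : ((pvZp nums L).getD j 0 % 2 == 0 && j % 2 != 0) = false := by
        rw [Bool.eq_false_iff, ne_eq, condE_bool, (hchar j hj).1, hEnil]
        exact List.not_mem_nil
      by_cases h2 : ((pvZp nums L).getD j 0 % 2 != 0 && j % 2 == 0) = true
      · have hfind : (List.range' (j+1) (nums.length - (j+1))).find?
            (fun k => k % 2 != 0 && (pvZp nums L).getD k 0 % 2 == 0) = none := by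
          rw [List.find?_eq_none]
          intro k hk
          rw [List.mem_range'_1] at hk
          have hkn : k < nums.length := by omega
          intro hp
          have hkprop := (predE_bool (pvZp nums L) k).mp hp
          have hmemE := (hchar k hkn).1.mp hkprop
          rw [hEnil] at hmemE
          exact absurd hmemE List.not_mem_nil
        simp only [pvJStep, h1, h2, hfind]
        rfl
      · rw [Bool.not_eq_true] at h2
        simp only [pvJStep, h1, h2]
        rfl
    · -- no misplaced odds remain
      have hOnil : (pvMisOdds nums).drop L = [] := by
        rw [List.drop_eq_nil_iff, hLdef, pairs_length]; omega
      have h2 : ((pvZp nums L).getD j 0 % 2 != 0 && j % 2 == 0) = false := by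
        rw [Bool.eq_false_iff, ne_eq, condO_bool, (hchar j hj).2, hOnil]
        exact List.not_mem_nil
      by_cases h1 : ((pvZp nums L).getD j 0 % 2 == 0 && j % 2 != 0) = true
      · have hfind : (List.range' (j+1) (nums.length - (j+1))).find?
            (fun k => k % 2 == 0 && (pvZp nums L).getD k 0 % 2 != 0) = none := by
          rw [List.find?_eq_none]
          intro k hk
          rw [List.mem_range'_1] at hk
          have hkn : k < nums.length := by omega
          intro hp
          have hkprop := (predO_bool (pvZp nums L) k).mp hp
          have hmemO := (hchar k hkn).2.mp hkprop
          rw [hOnil] at hmemO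
          exact absurd hmemO List.not_mem_nil
        simp only [pvJStep, h1, h2, hfind]
        rfl
      · rw [Bool.not_eq_true] at h1
        simp only [pvJStep, h1, h2]
        rfl
  · -- j out of range: the looked-up value defaults to 0 and the k-range is empty
    have hgd : (pvZp nums L).getD j 0 = 0 := by
      apply List.getD_eq_default
      rw [length_zp]; omega
    have hrange : nums.length - (j + 1) = 0 := by omega
    by_cases hjp : j % 2 = 0
    · have hc1 : (((0:Int) % 2 == 0) && (j % 2 != 0)) = false := by simp [hjp]
      have hc2 : (((0:Int) % 2 != 0) && (j % 2 == 0)) = false := by simp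
      simp only [pvJStep, hgd, hc1, hc2]
      rfl
    · have hj2 : j % 2 = 1 := by omega
      have hc1 : (((0:Int) % 2 == 0) && (j % 2 != 0)) = true := by simp [hj2]
      simp only [pvJStep, hgd, hc1, hrange]
      rfl

lemma foldl_noop (nums : List Int) (l : List Nat) : ∀ s : Bool,
    l.foldl (pvJStep nums.length) (pvZp nums (pvPairs nums).length, s)
      = (pvZp nums (pvPairs nums).length, s) := by
  induction l with
  | nil => intro s; rfl
  | cons j l ih => intro s; rw [List.foldl_cons, jstep_noop]; exact ih s

lemma outer_noop (nums : List Int) (is : List Nat) :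
    pvOuter nums.length is (pvZp nums (pvPairs nums).length)
      = pvZp nums (pvPairs nums).length := by
  cases is with
  | nil => rfl
  | cons i is =>
    show (if ((List.range (nums.length - i - 1)).foldl (pvJStep nums.length)
        (pvZp nums (pvPairs nums).length, false)).2 then _ else _) = _
    rw [foldl_noop]
    simp

-- a j-step at the head of the misplaced-evens suffix performs the next pairwise swap
lemma jstep_eq_of_misE (nums : List Int) (t : Nat) (ht : t < (pvPairs nums).length)
    (s : Bool) (hba : (pvMisEvens nums)[t]'(by rw [pairs_length] at ht; omega) <
      (pvMisOdds nums)[t]'(by rw [pairs_length] at ht; omega)) :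
    pvJStep nums.length (pvZp nums t, s) ((pvMisEvens nums)[t]'(by rw [pairs_length] at ht; omega))
      = (pvZp nums (t + 1), true) := by
  have htme : t < (pvMisEvens nums).length := by rw [pairs_length] at ht; omega
  have htmo : t < (pvMisOdds nums).length := by rw [pairs_length] at ht; omega
  set a := (pvMisEvens nums)[t] with hadef
  set b := (pvMisOdds nums)[t] with hbdef
  have hchar := zp_char nums t (le_of_lt ht)
  have haMemD : a ∈ (pvMisEvens nums).drop t := by
    rw [List.drop_eq_getElem_cons htme]; exact List.mem_cons_self
  have hbMemD : b ∈ (pvMisOdds nums).drop t := by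
    rw [List.drop_eq_getElem_cons htmo]; exact List.mem_cons_self
  have han : a < nums.length := by
    have := drop_mem_of_mem _ _ _ haMemD
    rw [mem_misEvens] at this; exact this.1
  have hbn : b < nums.length := by
    have := drop_mem_of_mem _ _ _ hbMemD
    rw [mem_misOdds] at this; exact this.1
  have h1 : ((pvZp nums t).getD a 0 % 2 == 0 && a % 2 != 0) = true := by
    rw [condE_bool, (hchar a han).1]
    exact haMemD
  have hfind : (List.range' (a+1) (nums.length - (a+1))).find?
      (fun k => k % 2 == 0 && (pvZp nums t).getD k 0 % 2 != 0) = some b := by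
    apply find?_range'_some _ _ _ _ (by omega) (by omega)
    · rw [predO_bool]
      exact (hchar b hbn).2.mpr hbMemD
    · intro m hm hmb
      rw [Bool.eq_false_iff, ne_eq, predO_bool, (hchar m (by omega)).2]
      intro hmem
      have := mem_drop_sorted_ge _ (sorted_misOdds nums) t htmo m hmem
      omega
  simp only [pvJStep, h1, if_pos, hfind]
  rw [zp_succ nums t ht, pairs_getElem nums t ht]
  rfl

-- a j-step at the head of the misplaced-odds suffix performs the next pairwise swap
lemma jstep_eq_of_misO (nums : List Int) (t : Nat) (ht : t < (pvPairs nums).length)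
    (s : Bool) (hba : (pvMisOdds nums)[t]'(by rw [pairs_length] at ht; omega) <
      (pvMisEvens nums)[t]'(by rw [pairs_length] at ht; omega)) :
    pvJStep nums.length (pvZp nums t, s) ((pvMisOdds nums)[t]'(by rw [pairs_length] at ht; omega))
      = (pvZp nums (t + 1), true) := by
  have htme : t < (pvMisEvens nums).length := by rw [pairs_length] at ht; omega
  have htmo : t < (pvMisOdds nums).length := by rw [pairs_length] at ht; omega
  set a := (pvMisEvens nums)[t] with hadef
  set b := (pvMisOdds nums)[t] with hbdef
  have hchar := zp_char nums t (le_of_lt ht)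
  have haMemD : a ∈ (pvMisEvens nums).drop t := by
    rw [List.drop_eq_getElem_cons htme]; exact List.mem_cons_self
  have hbMemD : b ∈ (pvMisOdds nums).drop t := by
    rw [List.drop_eq_getElem_cons htmo]; exact List.mem_cons_self
  have han : a < nums.length := by
    have := drop_mem_of_mem _ _ _ haMemD
    rw [mem_misEvens] at this; exact this.1
  have hbn : b < nums.length := by
    have := drop_mem_of_mem _ _ _ hbMemD
    rw [mem_misOdds] at this; exact this.1
  have hbprop := (hchar b hbn).2.mpr hbMemD
  have h1 : ((pvZp nums t).getD b 0 % 2 == 0 && b % 2 != 0) = false := by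
    have : b % 2 = 0 := hbprop.1
    simp [this]
  have h2 : ((pvZp nums t).getD b 0 % 2 != 0 && b % 2 == 0) = true := by
    rw [condO_bool]
    exact hbprop
  have hfind : (List.range' (b+1) (nums.length - (b+1))).find?
      (fun k => k % 2 != 0 && (pvZp nums t).getD k 0 % 2 == 0) = some a := by
    apply find?_range'_some _ _ _ _ (by omega) (by omega)
    · rw [predE_bool]
      exact (hchar a han).1.mpr haMemD
    · intro m hm hma
      rw [Bool.eq_false_iff, ne_eq, predE_bool, (hchar m (by omega)).1]
      intro hmem
      have := mem_drop_sorted_ge _ (sorted_misEvens nums) t htme m hmem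
      omega
  have hap : a % 2 = 1 := by
    have := drop_mem_of_mem _ _ _ haMemD
    rw [mem_misEvens] at this; exact this.2.1
  have hne : b ≠ a := by
    have : b % 2 = 0 := hbprop.1
    omega
  simp only [pvJStep, h1, h2, hfind]
  rw [zp_succ nums t ht, pairs_getElem nums t ht]
  show (pvSwap (pvZp nums t) b a, true) = (pvSwapPair (pvZp nums t) (a, b), true)
  have hbp0 : b % 2 = 0 := hbprop.1
  simp only [pvSwap, pvSwapPair, Prod.mk.injEq]
  refine ⟨?_, trivial⟩
  rw [List.set_comm]
  omega

-- the first pass performs exactly B's pairwise swaps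
lemma pass_eq (nums : List Int) : ∀ (d t : Nat) (s₀ : Bool) (p : Nat),
    p + d = nums.length - 1 →
    t ≤ (pvPairs nums).length →
    (∀ i, i < t → min ((pvMisEvens nums).getD i 0) ((pvMisOdds nums).getD i 0) < p) →
    (t < (pvPairs nums).length →
      p ≤ min ((pvMisEvens nums).getD t 0) ((pvMisOdds nums).getD t 0)) →
    (List.range' p d).foldl (pvJStep nums.length) (pvZp nums t, s₀)
      = (pvZp nums (pvPairs nums).length, s₀ || decide (t < (pvPairs nums).length)) := by
  intro d
  induction d with
  | zero =>
    intro t s₀ p hpd ht hlt hge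
    have hteq : t = (pvPairs nums).length := by
      by_contra hne
      have htl : t < (pvPairs nums).length := lt_of_le_of_ne ht hne
      have htme : t < (pvMisEvens nums).length := by rw [pairs_length] at htl; omega
      have htmo : t < (pvMisOdds nums).length := by rw [pairs_length] at htl; omega
      have hge' := hge htl
      rw [List.getD_eq_getElem _ _ htme, List.getD_eq_getElem _ _ htmo] at hge'
      have haMem : (pvMisEvens nums)[t] ∈ pvMisEvens nums := List.getElem_mem _
      have hbMem : (pvMisOdds nums)[t] ∈ pvMisOdds nums := List.getElem_mem _
      rw [mem_misEvens] at haMem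
      rw [mem_misOdds] at hbMem
      omega
    subst hteq
    simp
  | succ d ih =>
    intro t s₀ p hpd ht hlt hge
    have hpn : p < nums.length := by omega
    rw [List.range'_succ, List.foldl_cons]
    by_cases htl : t < (pvPairs nums).length
    · have htme : t < (pvMisEvens nums).length := by rw [pairs_length] at htl; omega
      have htmo : t < (pvMisOdds nums).length := by rw [pairs_length] at htl; omega
      have hge' := hge htl
      rw [List.getD_eq_getElem _ _ htme, List.getD_eq_getElem _ _ htmo] at hge'
      have hab : (pvMisEvens nums)[t] ≠ (pvMisOdds nums)[t] := by
        have h1 : (pvMisEvens nums)[t] ∈ pvMisEvens nums := List.getElem_mem _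
        have h2 : (pvMisOdds nums)[t] ∈ pvMisOdds nums := List.getElem_mem _
        rw [mem_misEvens] at h1
        rw [mem_misOdds] at h2
        intro h; rw [h] at h1; omega
      by_cases hpmin : p = min ((pvMisEvens nums)[t]) ((pvMisOdds nums)[t])
      · -- this step performs the next swap
        have hnext : ∀ i, i < t + 1 →
            min ((pvMisEvens nums).getD i 0) ((pvMisOdds nums).getD i 0) < p + 1 := by
          intro i hi
          rcases Nat.lt_or_ge i t with hit | hit
          · have := hlt i hit; omega
          · have : i = t := by omega
            subst this
            rw [List.getD_eq_getElem _ _ htme, List.getD_eq_getElem _ _ htmo]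
            omega
        have hnext2 : t + 1 < (pvPairs nums).length →
            p + 1 ≤ min ((pvMisEvens nums).getD (t+1) 0) ((pvMisOdds nums).getD (t+1) 0) := by
          intro ht1
          have h1me : t + 1 < (pvMisEvens nums).length := by rw [pairs_length] at ht1; omega
          have h1mo : t + 1 < (pvMisOdds nums).length := by rw [pairs_length] at ht1; omega
          rw [List.getD_eq_getElem _ _ h1me, List.getD_eq_getElem _ _ h1mo]
          have hs1 := getElem_strict _ (sorted_misEvens nums) t (t+1) htme h1me (by omega)
          have hs2 := getElem_strict _ (sorted_misOdds nums) t (t+1) htmo h1mo (by omega)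
          omega
        rcases Nat.lt_or_ge ((pvMisEvens nums)[t]) ((pvMisOdds nums)[t]) with hlt2 | hge2
        · have hpa : p = (pvMisEvens nums)[t] := by omega
          have hstep := jstep_eq_of_misE nums t htl s₀ hlt2
          rw [← hpa] at hstep
          rw [hstep, ih (t+1) true (p+1) (by omega) htl hnext hnext2]
          simp [htl]
        · have hba : (pvMisOdds nums)[t] < (pvMisEvens nums)[t] := by omega
          have hpb : p = (pvMisOdds nums)[t] := by omega
          have hstep := jstep_eq_of_misO nums t htl s₀ hba
          rw [← hpb] at hstep
          rw [hstep, ih (t+1) true (p+1) (by omega) htl hnext hnext2]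
          simp [htl]
      · -- p is below the next pair: no-op step
        have hpmin' : p < min ((pvMisEvens nums)[t]) ((pvMisOdds nums)[t]) := by omega
        have hE : p ∉ (pvMisEvens nums).drop t := by
          intro hmem
          have := mem_drop_sorted_ge _ (sorted_misEvens nums) t htme p hmem
          omega
        have hO : p ∉ (pvMisOdds nums).drop t := by
          intro hmem
          have := mem_drop_sorted_ge _ (sorted_misOdds nums) t htmo p hmem
          omega
        rw [jstep_eq_of_not_mis nums t ht p hpn hE hO s₀]
        apply ih t s₀ (p+1) (by omega) ht
        · intro i hi; have := hlt i hi; omega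
        · intro h
          have := hge h
          rw [List.getD_eq_getElem _ _ htme, List.getD_eq_getElem _ _ htmo] at this ⊢
          omega
    · -- all pairs already swapped
      have hteq : t = (pvPairs nums).length := by omega
      subst hteq
      rw [jstep_noop]
      have := ih (pvPairs nums).length s₀ (p+1) (by omega) le_rfl
        (fun i hi => by have := hlt i hi; omega) (fun h => absurd h (by omega))
      rw [this]

-- ===== VERDICT (by name: the statement is the Claim_ definition above) =====
theorem solution_604_5_spec : Claim_equal_solution_604_5 := by
  intro nums _
  unfold Spec_solution_604_5
  have halt : solution_604_5_alt nums = pvZp nums (pvPairs nums).length := by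
    rw [solution_604_5_alt, pvZp, List.take_length]
    rfl
  rw [halt, solution_604_5]
  have hzp0 : pvZp nums 0 = nums := rfl
  have hpass := pass_eq nums (nums.length - 1) 0 false 0 (by omega) (Nat.zero_le _)
    (fun i hi => absurd hi (Nat.not_lt_zero i)) (fun _ => Nat.zero_le _)
  rw [hzp0] at hpass
  cases hm : nums.length - 1 with
  | zero =>
    rw [hm] at hpass
    have h1 : nums = pvZp nums (pvPairs nums).length := by
      have := congrArg Prod.fst hpass
      simpa using this
    rw [List.range_zero]
    show nums = _
    exact h1
  | succ m =>
    rw [hm] at hpass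
    rw [List.range_eq_range', List.range'_succ]
    show (if ((List.range (nums.length - 0 - 1)).foldl (pvJStep nums.length)
        (nums, false)).2 then pvOuter nums.length (List.range' 1 m) _ else _) = _
    have hr : List.range (nums.length - 0 - 1) = List.range' 0 (m + 1) := by
      rw [Nat.sub_zero, hm, List.range_eq_range']
    rw [hr, hpass]
    by_cases hL : 0 < (pvPairs nums).length
    · rw [if_pos (by simp [hL])]
      exact outer_noop nums (List.range' 1 m)
    · rw [if_neg (by simp [hL])]
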